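-- pv_equiv track=rewrite | github.com/TDK1969/My-Leetcode | match/2024.9.21 meituan/1.py | solution
-- ===== SOURCE A (Python) =====
-- def solution(n: int) -> int:
--     if n <= 2:
--         return n
--     ans = 2
--     cur = 2
--
--     while cur < n:
--         cur += cur - 1
--         ans += 1
--     return ans
-- ===== SOURCE B (Python) =====
-- def solution(n: int) -> int:
--     if n <= 2:
--         return n
--     return 2 + (n - 2).bit_length()
-- ===== Notes on version B (the rewrite author's own statement) =====
-- stated objective: simpler
-- what changed: Replaced the doubling while-loop (cur = 2^i+1 after i steps) by the closed form 2 + (n-2).bit_length(), the smallest i with 2^i + 1 >= n, computed without a loop.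
import Mathlib
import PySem

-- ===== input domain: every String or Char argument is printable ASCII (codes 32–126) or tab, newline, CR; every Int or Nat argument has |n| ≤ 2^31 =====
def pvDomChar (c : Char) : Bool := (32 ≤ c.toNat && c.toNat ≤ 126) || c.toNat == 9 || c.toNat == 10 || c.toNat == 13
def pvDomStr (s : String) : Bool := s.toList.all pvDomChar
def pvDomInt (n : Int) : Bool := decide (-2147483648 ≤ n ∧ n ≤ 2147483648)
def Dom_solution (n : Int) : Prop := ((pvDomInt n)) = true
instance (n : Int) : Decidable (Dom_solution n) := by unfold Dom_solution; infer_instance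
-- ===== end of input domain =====

-- B replaces A's doubling while-loop by the closed form 2 + (n-2).bit_length() (objective: simpler, no loop).

-- ===== PORT A =====
-- while cur < n: cur += cur - 1; ans += 1.  The extra '2 ≤ cur' in the guard is a pure
-- totality guard: in A the loop only ever runs with cur ≥ 2, where it never fires differently.
def solLoop (n cur ans : Int) : Int :=
  if h : 2 ≤ cur ∧ cur < n then solLoop n (cur + cur - 1) (ans + 1) else ans
termination_by (n - cur).toNat
decreasing_by omega

def solution (n : Int) : Int :=
  if n ≤ 2 then n else solLoop n 2 2

-- ===== PORT B =====
-- (n-2).bit_length() for n > 2 is Nat.size of (n-2).toNat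
def solution_alt (n : Int) : Int :=
  if n ≤ 2 then n else 2 + (Nat.size (n - 2).toNat : Int)

-- ===== PRECONDITION & SPEC =====
def Spec_solution (n : Int) (out : Int) : Prop := out = solution_alt n
instance (n : Int) (out : Int) : Decidable (Spec_solution n out) := by unfold Spec_solution; infer_instance

-- ===== CLAIM (what is proved, stated in full; the proofs are below) =====
def Claim_equal_solution : Prop := ∀ (n : Int), Dom_solution n → Spec_solution n (solution n)

-- ===== LEMMAS AND PROOFS =====

-- After i iterations cur = 2^i + 1; the loop stops at the least i with 2^i + 1 ≥ n,
-- which for n ≥ 3 is i = Nat.size (n-2).toNat.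
theorem solLoop_closed (n : Int) (hn : 3 ≤ n) :
    ∀ (d i : Nat) (ans : Int), Nat.size (n - 2).toNat ≤ i + d →
      solLoop n ((2 : Int) ^ i + 1) ans = ans + ((Nat.size (n - 2).toNat - i : Nat) : Int) := by
  intro d
  induction d with
  | zero =>
    intro i ans hle
    simp only [Nat.add_zero] at hle
    have h2 : (n - 2).toNat < 2 ^ i := Nat.size_le.mp hle
    have hcast : ((n - 2).toNat : Int) = n - 2 := Int.toNat_of_nonneg (by omega)
    have hpow : ((2 ^ i : Nat) : Int) = (2 : Int) ^ i := by push_cast; ring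
    have hlt : n - 2 < (2 : Int) ^ i := by
      calc n - 2 = ((n - 2).toNat : Int) := hcast.symm
        _ < ((2 ^ i : Nat) : Int) := by exact_mod_cast h2
        _ = (2 : Int) ^ i := hpow
    rw [solLoop]
    have hguard : ¬ (2 ≤ (2 : Int) ^ i + 1 ∧ (2 : Int) ^ i + 1 < n) := by
      intro ⟨_, hc⟩; omega
    rw [dif_neg hguard]
    have : Nat.size (n - 2).toNat - i = 0 := by omega
    simp [this]
  | succ d ih =>
    intro i ans hle
    by_cases hki : Nat.size (n - 2).toNat ≤ i
    · -- loop exits immediately, same as base case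
      have h2 : (n - 2).toNat < 2 ^ i := Nat.size_le.mp hki
      have hcast : ((n - 2).toNat : Int) = n - 2 := Int.toNat_of_nonneg (by omega)
      have hlt : n - 2 < (2 : Int) ^ i := by
        calc n - 2 = ((n - 2).toNat : Int) := hcast.symm
          _ < ((2 ^ i : Nat) : Int) := by exact_mod_cast h2
          _ = (2 : Int) ^ i := by push_cast; ring
      rw [solLoop]
      have hguard : ¬ (2 ≤ (2 : Int) ^ i + 1 ∧ (2 : Int) ^ i + 1 < n) := by
        intro ⟨_, hc⟩; omega
      rw [dif_neg hguard]
      have : Nat.size (n - 2).toNat - i = 0 := by omega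
      simp [this]
    · -- one more iteration
      have hik : i < Nat.size (n - 2).toNat := by omega
      have h2 : 2 ^ i ≤ (n - 2).toNat := Nat.lt_size.mp hik
      have hcast : ((n - 2).toNat : Int) = n - 2 := Int.toNat_of_nonneg (by omega)
      have hle2 : (2 : Int) ^ i ≤ n - 2 := by
        calc (2 : Int) ^ i = ((2 ^ i : Nat) : Int) := by push_cast; ring
          _ ≤ ((n - 2).toNat : Int) := by exact_mod_cast h2
          _ = n - 2 := hcast
      have hpos : (0 : Int) < (2 : Int) ^ i := by positivity
      rw [solLoop]
      have hguard : 2 ≤ (2 : Int) ^ i + 1 ∧ (2 : Int) ^ i + 1 < n := by constructor <;> omega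
      rw [dif_pos hguard]
      have hstep : (2 : Int) ^ i + 1 + ((2 : Int) ^ i + 1) - 1 = (2 : Int) ^ (i + 1) + 1 := by
        rw [pow_succ]; ring
      rw [hstep, ih (i + 1) (ans + 1) (by omega)]
      have : Nat.size (n - 2).toNat - i = (Nat.size (n - 2).toNat - (i + 1)) + 1 := by omega
      rw [this]; push_cast; ring

-- ===== VERDICT (by name: the statement is the Claim_ definition above) =====
theorem solution_spec : Claim_equal_solution := by
  intro n _
  unfold Spec_solution solution solution_alt
  by_cases h : n ≤ 2
  · simp [h]
  · simp only [if_neg h]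
    have hn : 3 ≤ n := by omega
    have h2 : (2 : Int) = (2 : Int) ^ 0 + 1 := by norm_num
    rw [show solLoop n 2 2 = solLoop n ((2 : Int) ^ 0 + 1) 2 by rw [← h2],
      solLoop_closed n hn (Nat.size (n - 2).toNat) 0 2 (by omega)]
    simp
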